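-- pv_equiv track=rewrite | github.com/CoDS-GCS/Chatty-Gen | benchmark/experiments/complexity_chart.py | extract_first_word
-- ===== SOURCE A (Python) =====
-- def extract_first_word(data):
--     updated_data = dict()
--     for key, value in data.items():
--         word = key.split(' ')[0]
--         if word in updated_data:
--             updated_data[word] += value
--         else:
--             updated_data[word] = value
--     return updated_data
-- ===== SOURCE B (Python) =====
-- def extract_first_word(data):
--     # Group values by first word, then sum each group (two-phase instead of running accumulator).
--     groups = {}
--     for key, value in data.items():
--         groups.setdefault(key.split(' ')[0], []).append(value)
--     return {word: sum(values) for word, values in groups.items()}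
-- ===== Notes on version B (the rewrite author's own statement) =====
-- stated objective: alternative
-- what changed: B replaces A's single running-accumulator scan (membership test + in-place '+=') by a two-phase group-then-aggregate pipeline: first bucket every value into a list keyed by the key's first word, then build the result by summing each bucket.
import Mathlib
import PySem

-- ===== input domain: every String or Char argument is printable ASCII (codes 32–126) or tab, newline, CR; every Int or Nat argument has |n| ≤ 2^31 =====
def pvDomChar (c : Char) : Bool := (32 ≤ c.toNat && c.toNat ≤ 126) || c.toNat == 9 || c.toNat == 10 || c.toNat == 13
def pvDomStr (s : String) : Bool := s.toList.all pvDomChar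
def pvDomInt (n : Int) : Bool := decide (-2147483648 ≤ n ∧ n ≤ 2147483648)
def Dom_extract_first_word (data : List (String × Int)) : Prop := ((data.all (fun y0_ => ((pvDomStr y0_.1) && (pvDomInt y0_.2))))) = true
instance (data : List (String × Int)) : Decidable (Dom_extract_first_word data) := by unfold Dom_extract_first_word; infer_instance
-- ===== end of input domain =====

-- B changes A's running-accumulator scan into a group-values-then-sum pipeline (alternative decomposition, same cost).

-- key.split(' ')[0]; split on ' ' never returns an empty list, so index 0 is the head
def pvWord (s : String) : String := ((PySem.Str.split? s " ").getD []).headD ""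

-- ===== PORT A =====
-- one iteration of A's loop body
def pvStepA (d : PySem.Dict String Int) (kv : String × Int) : PySem.Dict String Int :=
  let word := pvWord kv.1
  if d.contains word then d.modify word 0 (· + kv.2)   -- updated_data[word] += value
  else d.insert word kv.2                              -- updated_data[word] = value

def extract_first_word (data : List (String × Int)) : List (String × Int) :=
  (data.foldl pvStepA PySem.Dict.empty).items

-- ===== PORT B =====
-- one iteration of B's grouping loop: groups.setdefault(word, []).append(value)
def pvStepB (d : PySem.Dict String (List Int)) (kv : String × Int) : PySem.Dict String (List Int) :=
  d.modify (pvWord kv.1) [] (· ++ [kv.2])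

def pvSum (l : List Int) : Int := l.foldl (· + ·) 0   -- sum(values)

def extract_first_word_alt (data : List (String × Int)) : List (String × Int) :=
  ((data.foldl pvStepB PySem.Dict.empty).items).map (fun q => (q.1, pvSum q.2))

-- ===== PRECONDITION & SPEC =====
def Spec_extract_first_word (data : List (String × Int)) (out : List (String × Int)) : Prop := out = extract_first_word_alt data
instance (data : List (String × Int)) (out : List (String × Int)) : Decidable (Spec_extract_first_word data out) := by unfold Spec_extract_first_word; infer_instance

-- ===== CLAIM (what is proved, stated in full; the proofs are below) =====
def Claim_equal_extract_first_word : Prop := ∀ (data : List (String × Int)), Dom_extract_first_word data → Spec_extract_first_word data (extract_first_word data)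

-- ===== LEMMAS AND PROOFS =====

-- the abstraction from a B-state entry to the corresponding A-state entry
def pvG (q : String × List Int) : String × Int := (q.1, pvSum q.2)

theorem pvSum_append_singleton (l : List Int) (v : Int) : pvSum (l ++ [v]) = pvSum l + v := by
  simp [pvSum]

theorem contains_map_g (L : List (String × List Int)) (w : String) :
    (PySem.Dict.mk (L.map pvG)).contains w = (PySem.Dict.mk L).contains w := by
  simp [PySem.Dict.contains, List.any_map, Function.comp_def, pvG]

theorem getD_map_g (L : List (String × List Int)) (w : String) :
    (PySem.Dict.mk (L.map pvG)).getD w 0 = pvSum ((PySem.Dict.mk L).getD w []) := by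
  induction L with
  | nil => simp [PySem.Dict.getD, PySem.Dict.get?, pvSum]
  | cons p rest ih =>
    obtain ⟨k, l⟩ := p
    by_cases h : k = w
    · simp [PySem.Dict.getD, PySem.Dict.get?_mk_cons, pvG, h]
    · simpa [PySem.Dict.getD, PySem.Dict.get?_mk_cons, pvG, h] using ih

theorem step_commute (dB : PySem.Dict String (List Int)) (kv : String × Int) :
    pvStepA (PySem.Dict.mk (dB.items.map pvG)) kv = PySem.Dict.mk ((pvStepB dB kv).items.map pvG) := by
  apply PySem.Dict.ext
  obtain ⟨L⟩ := dB
  set w := pvWord kv.1 with hw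
  by_cases hc : (PySem.Dict.mk L).contains w = true
  · have hcg : (PySem.Dict.mk (L.map pvG)).contains w = true := by rw [contains_map_g]; exact hc
    simp only [pvStepA, pvStepB, PySem.Dict.modify, ← hw, hcg, if_pos]
    rw [PySem.Dict.items_insert, PySem.Dict.items_insert]
    simp only [hcg, hc, if_pos, List.map_map]
    apply List.map_congr_left
    intro p _
    by_cases hp : (p.1 == w) = true
    · simp only [Function.comp, pvG, hp, if_pos, getD_map_g]
      rw [pvSum_append_singleton]
    · simp [Function.comp, pvG, hp]
  · have hc' : (PySem.Dict.mk L).contains w = false := Bool.eq_false_iff.mpr hc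
    have hcg : (PySem.Dict.mk (L.map pvG)).contains w = false := by
      rw [contains_map_g]; exact hc'
    have hgd : (PySem.Dict.mk L).getD w [] = [] :=
      PySem.Dict.getD_of_not_contains _ _ hc'
    simp only [pvStepA, pvStepB, PySem.Dict.modify, ← hw, hcg, if_neg, Bool.false_eq_true,
      not_false_iff]
    rw [PySem.Dict.items_insert, PySem.Dict.items_insert]
    simp only [hcg, hc', Bool.false_eq_true, if_neg, not_false_iff, hgd]
    simp [pvG, pvSum]

theorem fold_invariant (data : List (String × Int)) :
    ∀ dB : PySem.Dict String (List Int),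
      (data.foldl pvStepA (PySem.Dict.mk (dB.items.map pvG))).items
        = (data.foldl pvStepB dB).items.map pvG := by
  induction data with
  | nil => intro dB; rfl
  | cons kv rest ih =>
    intro dB
    simp only [List.foldl_cons, step_commute dB kv]
    exact ih (pvStepB dB kv)

-- ===== VERDICT (by name: the statement is the Claim_ definition above) =====
theorem extract_first_word_spec : Claim_equal_extract_first_word := by
  intro data _
  unfold Spec_extract_first_word extract_first_word extract_first_word_alt
  have h := fold_invariant data PySem.Dict.empty
  simpa [PySem.Dict.empty, pvG] using h
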